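-- pv_equiv track=rewrite | github.com/GeorgeTouros/video-soundtrack-evaluation | media_manipulation/song_retrieval.py | create_match_ids_per_video_segment
-- ===== SOURCE A (Python) =====
-- def create_match_ids_per_video_segment(tags):
--     match_id = 0
--     match_ids = []
--     for tag in tags:
--         if tag == 'B':
--             match_id += 1
--             match_ids.append(match_id)
--         elif tag in ['I', 'E']:
--             match_ids.append(match_id)
--         else:
--             match_ids.append(None)
--     return match_ids
-- ===== SOURCE B (Python) =====
-- def create_match_ids_per_video_segment(tags):
--     tags = list(tags)
--     counts = []
--     c = 0
--     for t in tags: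
--         c += (t == 'B')
--         counts.append(c)
--     return [k if t in ('B', 'I', 'E') else None for t, k in zip(tags, counts)]
-- ===== Notes on version B (the rewrite author's own statement) =====
-- stated objective: alternative
-- what changed: B first builds a prefix-count table of 'B' occurrences, then maps each (tag, count) pair to its id in a second zip pass, instead of threading one counter and appending inside a single branching loop.
import Mathlib
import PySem

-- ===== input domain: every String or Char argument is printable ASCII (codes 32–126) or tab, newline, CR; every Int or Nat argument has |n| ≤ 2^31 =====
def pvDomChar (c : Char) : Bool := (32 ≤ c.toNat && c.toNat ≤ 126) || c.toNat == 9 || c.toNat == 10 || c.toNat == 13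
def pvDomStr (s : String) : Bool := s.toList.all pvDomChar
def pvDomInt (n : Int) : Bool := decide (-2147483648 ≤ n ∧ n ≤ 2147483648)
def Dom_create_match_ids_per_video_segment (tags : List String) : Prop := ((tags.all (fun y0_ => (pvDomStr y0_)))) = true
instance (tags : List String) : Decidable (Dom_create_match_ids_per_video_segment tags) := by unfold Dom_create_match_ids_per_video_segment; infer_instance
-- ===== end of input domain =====

-- B builds a prefix-count table of 'B' occurrences first, then maps tag/count pairs; same values as A's threaded counter (objective: alternative decomposition).

-- ===== PORT A =====
-- one fold threading (match_id, match_ids), exactly A's loop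
def create_match_ids_per_video_segment (tags : List String) : List (Option Int) :=
  (tags.foldl
    (fun (st : Int × List (Option Int)) tag =>
      if tag == "B" then (st.1 + 1, st.2 ++ [some (st.1 + 1)])
      else if tag == "I" || tag == "E" then (st.1, st.2 ++ [some st.1])
      else (st.1, st.2 ++ [none]))
    (0, [])).2

-- ===== PORT B =====
-- first pass of Source B: running prefix counts of "B"
def pvCountsB : List String → Int → List Int
  | [], _ => []
  | t :: ts, c =>
      let c' := c + (if t == "B" then 1 else 0)
      c' :: pvCountsB ts c'

-- second pass of Source B: zip tags with counts and map
def create_match_ids_per_video_segment_alt (tags : List String) : List (Option Int) :=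
  (tags.zip (pvCountsB tags 0)).map
    (fun p => if p.1 == "B" || p.1 == "I" || p.1 == "E" then some p.2 else none)

-- ===== PRECONDITION & SPEC =====
def Spec_create_match_ids_per_video_segment (tags : List String) (out : List (Option Int)) : Prop := out = create_match_ids_per_video_segment_alt tags
instance (tags : List String) (out : List (Option Int)) : Decidable (Spec_create_match_ids_per_video_segment tags out) := by unfold Spec_create_match_ids_per_video_segment; infer_instance

-- ===== CLAIM (what is proved, stated in full; the proofs are below) =====
def Claim_equal_create_match_ids_per_video_segment : Prop := ∀ (tags : List String), Dom_create_match_ids_per_video_segment tags → Spec_create_match_ids_per_video_segment tags (create_match_ids_per_video_segment tags)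

-- ===== LEMMAS AND PROOFS =====

theorem pv_fold_invariant (tags : List String) (c : Int) (acc : List (Option Int)) :
    (tags.foldl
      (fun (st : Int × List (Option Int)) tag =>
        if tag == "B" then (st.1 + 1, st.2 ++ [some (st.1 + 1)])
        else if tag == "I" || tag == "E" then (st.1, st.2 ++ [some st.1])
        else (st.1, st.2 ++ [none]))
      (c, acc)).2
    = acc ++ (tags.zip (pvCountsB tags c)).map
        (fun p => if p.1 == "B" || p.1 == "I" || p.1 == "E" then some p.2 else none) := by
  induction tags generalizing c acc with
  | nil => simp
  | cons t ts ih =>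
    by_cases hB : t = "B"
    · subst hB
      rw [List.foldl_cons, if_pos (by simp : (("B" : String) == "B") = true), ih]
      simp [pvCountsB]
    · have h1 : ¬ ((t == "B") = true) := by simp [hB]
      by_cases hI : t = "I"
      · subst hI
        rw [List.foldl_cons, if_neg h1,
          if_pos (by simp : (("I" : String) == "I" || ("I" : String) == "E") = true), ih]
        simp [pvCountsB]
      · by_cases hE : t = "E"
        · subst hE
          rw [List.foldl_cons, if_neg h1,
            if_pos (by simp : (("E" : String) == "I" || ("E" : String) == "E") = true), ih]
          simp [pvCountsB]
        · have h2 : ¬ ((t == "I" || t == "E") = true) := by simp [hI, hE]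
          rw [List.foldl_cons, if_neg h1, if_neg h2, ih]
          simp [pvCountsB, hB, hI, hE]

-- ===== VERDICT (by name: the statement is the Claim_ definition above) =====
theorem create_match_ids_per_video_segment_spec : Claim_equal_create_match_ids_per_video_segment := by
  intro tags _
  unfold Spec_create_match_ids_per_video_segment create_match_ids_per_video_segment create_match_ids_per_video_segment_alt
  simpa using pv_fold_invariant tags 0 []
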